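-- pv_equiv track=rewrite | github.com/AbdullWasay/Chambers_V | sourcecode/server/controllers/ats_controller.py | check_section_headers
-- ===== SOURCE A (Python) =====
-- def check_section_headers(resume_data):
--     """Check if the resume has standard section headers"""
--     score = 15
--     feedback = []
--
--     # Define standard section headers
--     standard_sections = [
--         "summary", "experience", "work", "employment", "education",
--         "skills", "certifications", "projects", "achievements"
--     ]
--
--     # Check which standard sections are present
--     found_sections = []
--     for section in standard_sections:
--         if section in resume_data or any(s.lower() == section for s in resume_data.keys()):
--             found_sections.append(section)
--
--     # Calculate score based on presence of key sections
--     essential_sections = ["experience", "work", "employment", "education", "skills"]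
--     essential_found = any(section in found_sections for section in ["experience", "work", "employment"])
--
--     if not essential_found:
--         score -= 7
--         feedback.append("Missing work experience section (critical for ATS)")
--
--     if "education" not in found_sections:
--         score -= 4
--         feedback.append("Missing education section")
--
--     if "skills" not in found_sections:
--         score -= 4
--         feedback.append("Missing skills section")
--
--     # If all good and no feedback
--     if not feedback:
--         feedback.append("All essential section headers are present")
--
--     return max(0, score), feedback
-- ===== SOURCE B (Python) =====
-- def check_section_headers(resume_data):
--     """Check if the resume has standard section headers"""
--     # One pass over the resume's keys, accumulating three presence flags;
--     # then a declarative rule table drives score deductions and feedback.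
--     has_exp = has_edu = has_skills = False
--     for key in resume_data:
--         k = key.lower()
--         has_exp = has_exp or k in ("experience", "work", "employment")
--         has_edu = has_edu or k == "education"
--         has_skills = has_skills or k == "skills"
--
--     rules = [
--         (has_exp, 7, "Missing work experience section (critical for ATS)"),
--         (has_edu, 4, "Missing education section"),
--         (has_skills, 4, "Missing skills section"),
--     ]
--     score = 15
--     feedback = []
--     for found, penalty, message in rules:
--         if not found:
--             score -= penalty
--             feedback.append(message)
--     return max(0, score), feedback or ["All essential section headers are present"]
-- ===== Notes on version B (the rewrite author's own statement) =====
-- stated objective: simpler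
-- what changed: Instead of A's loop over nine standard section names (each rescanning all keys) building a found_sections list and then three ad-hoc membership tests, B makes a single pass over the resume keys accumulating three boolean flags and then folds a declarative rule table (flag, penalty, message) to produce the score and feedback.
import Mathlib
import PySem

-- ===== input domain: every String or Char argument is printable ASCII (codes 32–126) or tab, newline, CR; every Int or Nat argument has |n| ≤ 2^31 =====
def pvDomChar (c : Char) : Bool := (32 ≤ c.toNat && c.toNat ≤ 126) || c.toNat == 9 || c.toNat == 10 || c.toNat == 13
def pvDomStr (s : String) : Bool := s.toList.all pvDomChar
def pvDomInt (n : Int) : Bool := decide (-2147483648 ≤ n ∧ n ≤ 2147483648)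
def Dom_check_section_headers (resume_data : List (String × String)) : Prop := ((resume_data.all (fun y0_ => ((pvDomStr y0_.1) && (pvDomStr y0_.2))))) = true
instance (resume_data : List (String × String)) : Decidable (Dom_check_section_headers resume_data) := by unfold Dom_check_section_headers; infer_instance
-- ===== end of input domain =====

-- B replaces A's nine-section loop (each section rescanning all keys) by one pass over
-- the keys accumulating three presence flags, then a fold over a declarative rule table
-- (flag, penalty, message) producing score and feedback (objective: simpler).

-- ===== PORT A =====
-- The dict is the association list; only key membership is used, so 'section in
-- resume_data' is 'any key equals section' and '.keys()' is the list of first components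
-- (duplicate keys cannot change any membership test).
def check_section_headers (resume_data : List (String × String)) : Int × List String :=
  let score : Int := 15
  let feedback : List String := []
  let standard_sections : List String :=
    ["summary", "experience", "work", "employment", "education",
     "skills", "certifications", "projects", "achievements"]
  let found_sections : List String :=
    standard_sections.foldl (fun acc sec =>
      if resume_data.any (fun p => p.1 == sec)
         || (resume_data.map Prod.fst).any (fun s => PySem.Str.lower s == sec)
      then acc ++ [sec] else acc) []
  let essential_found : Bool :=
    (["experience", "work", "employment"]).any (fun sec => found_sections.contains sec)
  let (score, feedback) :=
    if !essential_found then
      (score - 7, feedback ++ ["Missing work experience section (critical for ATS)"])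
    else (score, feedback)
  let (score, feedback) :=
    if !(found_sections.contains "education") then
      (score - 4, feedback ++ ["Missing education section"])
    else (score, feedback)
  let (score, feedback) :=
    if !(found_sections.contains "skills") then
      (score - 4, feedback ++ ["Missing skills section"])
    else (score, feedback)
  let feedback := if feedback.isEmpty then ["All essential section headers are present"] else feedback
  (max 0 score, feedback)

-- ===== PORT B =====
-- 'k in ("experience", "work", "employment")' is tuple membership, ported as contains.
def check_section_headers_alt (resume_data : List (String × String)) : Int × List String :=
  let flags : Bool × Bool × Bool :=
    resume_data.foldl (fun (f : Bool × Bool × Bool) p =>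
      let k := PySem.Str.lower p.1
      (f.1 || (["experience", "work", "employment"] : List String).contains k,
       f.2.1 || k == "education",
       f.2.2 || k == "skills")) (false, false, false)
  let rules : List (Bool × Int × String) :=
    [(flags.1, 7, "Missing work experience section (critical for ATS)"),
     (flags.2.1, 4, "Missing education section"),
     (flags.2.2, 4, "Missing skills section")]
  let (score, feedback) :=
    rules.foldl (fun (acc : Int × List String) r =>
      if !r.1 then (acc.1 - r.2.1, acc.2 ++ [r.2.2]) else acc) ((15 : Int), ([] : List String))
  (max 0 score, if feedback.isEmpty then ["All essential section headers are present"] else feedback)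

-- ===== PRECONDITION & SPEC =====
def Spec_check_section_headers (resume_data : List (String × String)) (out : Int × List String) : Prop := out = check_section_headers_alt resume_data
instance (resume_data : List (String × String)) (out : Int × List String) : Decidable (Spec_check_section_headers resume_data out) := by unfold Spec_check_section_headers; infer_instance

-- ===== CLAIM (what is proved, stated in full; the proofs are below) =====
def Claim_equal_check_section_headers : Prop := ∀ (resume_data : List (String × String)), Dom_check_section_headers resume_data → Spec_check_section_headers resume_data (check_section_headers resume_data)

-- ===== LEMMAS AND PROOFS =====

-- A's two-part per-section test collapses to one scan of the lowercased keys,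
-- for any section name fixed by lowercasing.
theorem condA_eq_any (rd : List (String × String)) (s : String) (h : PySem.Str.lower s = s) :
    (rd.any (fun p => p.1 == s) || (rd.map Prod.fst).any (fun k => PySem.Str.lower k == s))
      = rd.any (fun p => PySem.Str.lower p.1 == s) := by
  induction rd with
  | nil => rfl
  | cons p t ih =>
    simp only [List.any_cons, List.map_cons]
    by_cases hp : p.1 = s
    · subst hp; simp [h]
    · have h1 : (p.1 == s) = false := beq_false_of_ne hp
      cases hb : (PySem.Str.lower p.1 == s) with
      | true => simp [h1]
      | false => simp only [h1, Bool.false_or]; exact ih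

-- the found_sections fold is 'filter' of the per-section condition
theorem foldl_filter {α : Type} (cond : α → Bool) (l : List α) (init : List α) :
    l.foldl (fun acc x => if cond x then acc ++ [x] else acc) init = init ++ l.filter cond := by
  induction l generalizing init with
  | nil => simp
  | cons x t ih =>
    simp only [List.foldl_cons, List.filter_cons]
    by_cases hx : cond x = true
    · simp [hx, ih]
    · simp [Bool.not_eq_true] at hx; simp [hx, ih]

theorem contains_filter (cond : String → Bool) (l : List String) (s : String) (hs : s ∈ l) :
    ((l.filter cond).contains s) = cond s := by
  rw [Bool.eq_iff_iff]
  simp [List.mem_filter, hs]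

-- any distributes over a pointwise disjunction
theorem any_or {α : Type} (l : List α) (f g : α → Bool) :
    l.any (fun x => f x || g x) = (l.any f || l.any g) := by
  induction l with
  | nil => rfl
  | cons x t ih =>
    simp only [List.any_cons, ih]
    cases f x <;> cases g x <;> cases t.any f <;> cases t.any g <;> rfl

-- B's flag-accumulating pass computes the three 'any' scans
theorem flags_eq (rd : List (String × String)) (a b c : Bool) :
    rd.foldl (fun (f : Bool × Bool × Bool) p =>
      let k := PySem.Str.lower p.1
      (f.1 || (["experience", "work", "employment"] : List String).contains k,
       f.2.1 || k == "education",
       f.2.2 || k == "skills")) (a, b, c)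
    = (a || rd.any (fun p => (["experience", "work", "employment"] : List String).contains (PySem.Str.lower p.1)),
       b || rd.any (fun p => PySem.Str.lower p.1 == "education"),
       c || rd.any (fun p => PySem.Str.lower p.1 == "skills")) := by
  induction rd generalizing a b c with
  | nil => simp
  | cons p t ih =>
    simp only [List.foldl_cons, List.any_cons, ih, Bool.or_assoc]

theorem contains_three (k : String) :
    ((["experience", "work", "employment"] : List String).contains k)
      = ((k == "experience") || ((k == "work") || (k == "employment"))) := by
  simp only [List.contains_cons, List.contains_nil, Bool.or_false]

-- ===== VERDICT (by name: the statement is the Claim_ definition above) =====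
theorem check_section_headers_spec : Claim_equal_check_section_headers := by
  intro rd _
  show check_section_headers rd = check_section_headers_alt rd
  unfold check_section_headers check_section_headers_alt
  simp only [foldl_filter, List.nil_append, flags_eq, Bool.false_or]
  set cond : String → Bool := fun sec =>
      rd.any (fun p => p.1 == sec)
        || (rd.map Prod.fst).any (fun s => PySem.Str.lower s == sec) with hcond
  have hc : ∀ s : String, PySem.Str.lower s = s →
      cond s = rd.any (fun p => PySem.Str.lower p.1 == s) := by
    intro s hs; rw [hcond]; exact condA_eq_any rd s hs
  simp only [List.any_cons, List.any_nil, Bool.or_false, List.foldl_cons, List.foldl_nil]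
  rw [contains_filter cond _ "experience" (by decide),
      contains_filter cond _ "work" (by decide),
      contains_filter cond _ "employment" (by decide),
      contains_filter cond _ "education" (by decide),
      contains_filter cond _ "skills" (by decide),
      hc "experience" (by decide), hc "work" (by decide), hc "employment" (by decide),
      hc "education" (by decide), hc "skills" (by decide)]
  have h3 : (rd.any (fun p => (["experience", "work", "employment"] : List String).contains (PySem.Str.lower p.1)))
      = (rd.any (fun p => PySem.Str.lower p.1 == "experience")
         || (rd.any (fun p => PySem.Str.lower p.1 == "work")
             || rd.any (fun p => PySem.Str.lower p.1 == "employment"))) := by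
    simp only [contains_three, any_or]
  rw [h3]
  cases rd.any (fun p => PySem.Str.lower p.1 == "experience") <;>
  cases rd.any (fun p => PySem.Str.lower p.1 == "work") <;>
  cases rd.any (fun p => PySem.Str.lower p.1 == "employment") <;>
  cases rd.any (fun p => PySem.Str.lower p.1 == "education") <;>
  cases rd.any (fun p => PySem.Str.lower p.1 == "skills") <;> rfl
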